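-- pv_equiv track=rewrite | github.com/Technical-1/Git-Archiver | src/utils.py | validate_repo_url
-- ===== SOURCE A (Python) =====
-- def validate_repo_url(url: str) -> bool:
--     """
--     Check if a URL looks like a valid GitHub repository.
--
--     Handles various GitHub URL formats:
--     - https://github.com/owner/repo
--     - https://github.com/owner/repo/
--     - https://github.com/owner/repo.git
--     """
--     if not url or not isinstance(url, str):
--         return False
--
--     # Clean up the URL
--     url = url.strip()
--
--     # Skip comment lines
--     if url.startswith('#'):
--         return False
--
--     # Must start with github.com
--     if not url.startswith("https://github.com/") and not url.startswith("http://github.com/"):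
--         return False
--
--     # Remove protocol and github.com part
--     path = url.split("github.com/", 1)[-1]
--
--     # Remove trailing slashes
--     path = path.rstrip("/")
--
--     # Remove .git extension if present
--     if path.endswith(".git"):
--         path = path[:-4]
--
--     # Split the path into parts
--     parts = path.split("/")
--
--     # Need at least owner/repo
--     if len(parts) < 2:
--         return False
--
--     # Extract owner and repo
--     owner, repo = parts[0], parts[1]
--
--     # Check for empty components
--     if not owner or not repo:
--         return False
--
--     # Check repo name has only valid characters (alphanumeric plus dash, underscore, dot)
--     if not all(c.isalnum() or c in "-_." for c in repo):
--         return False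
--
--     return True
-- ===== SOURCE B (Python) =====
-- def validate_repo_url(url: str) -> bool:
--     if not url or not isinstance(url, str):
--         return False
--     url = url.strip()
--     if url.startswith('#'):
--         return False
--     if url.startswith("https://github.com/"):
--         path = url[19:]
--     elif url.startswith("http://github.com/"):
--         path = url[18:]
--     else:
--         return False
--     # find the effective end: ignore trailing slashes, then an optional '.git'
--     e = len(path)
--     while e and path[e - 1] == '/':
--         e -= 1
--     if e >= 4 and path[e - 4:e] == '.git':
--         e -= 4
--     # single left-to-right state-machine pass over path[:e]
--     state = 0      # 0 = reading owner, 1 = reading repo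
--     seen = False   # current segment has at least one character
--     ok = True      # repo characters all valid so far
--     for c in path[:e]:
--         if c == '/':
--             if state == 1:
--                 return seen and ok
--             if not seen:
--                 return False
--             state, seen = 1, False
--         elif state == 1:
--             seen = True
--             ok = ok and (c.isalnum() or c in "-_.")
--         else:
--             seen = True
--     return state == 1 and seen and ok
-- ===== Notes on version B (the rewrite author's own statement) =====
-- stated objective: alternative
-- what changed: Replaces A's staged string pipeline (prefix split, right-stripping slashes, suffix slicing, splitting the path into a list of segments, then a separate all() pass over the second segment) with a right-to-left index scan that finds the effective end of the path and a single left-to-right finite-state-machine pass that validates owner and repo with early returns, never building a list of segments.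
import Mathlib
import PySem

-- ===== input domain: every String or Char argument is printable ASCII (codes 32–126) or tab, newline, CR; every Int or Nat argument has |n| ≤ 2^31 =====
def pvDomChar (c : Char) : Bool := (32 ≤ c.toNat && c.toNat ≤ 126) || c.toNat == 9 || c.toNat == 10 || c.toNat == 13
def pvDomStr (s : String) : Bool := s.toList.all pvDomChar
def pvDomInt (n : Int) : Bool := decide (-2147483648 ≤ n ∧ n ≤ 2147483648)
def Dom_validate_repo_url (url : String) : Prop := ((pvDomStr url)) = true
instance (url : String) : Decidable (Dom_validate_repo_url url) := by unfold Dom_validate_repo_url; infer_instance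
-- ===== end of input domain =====

-- B replaces A's split/rstrip/split-into-parts pipeline by a right-to-left index scan for the
-- effective end plus ONE left-to-right state-machine pass validating owner and repo (alternative).

-- ===== PORT A =====
def validate_repo_url (url : String) : Bool :=
  if url == "" then false
  else
    let u := (PySem.Str.strip url).toList
    if PySem.Chars.startswith u ['#'] then false
    else if !(PySem.Chars.startswith u "https://github.com/".toList)
            && !(PySem.Chars.startswith u "http://github.com/".toList) then false
    else
      -- url.split("github.com/", 1)[-1]: split never returns an empty list, so [-1] never raises
      let parts0 := PySem.Chars.splitOnMax u "github.com/".toList 1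
      let path0 := (PySem.List.pyGet? parts0 (-1)).getD []
      -- path.rstrip("/"): hand port, exact for the single-character strip set "/"
      let path1 := (path0.reverse.dropWhile (fun c => c == '/')).reverse
      let path := if PySem.Chars.endswith path1 ".git".toList
                  then PySem.Chars.slice path1 none (some (-4)) else path1
      let parts := PySem.Chars.splitOn path ['/']
      if parts.length < 2 then false
      else
        let owner := parts.getD 0 []
        let repo := parts.getD 1 []
        if owner.isEmpty || repo.isEmpty then false
        else if !(repo.all (fun c => PySem.Chars.isalnum c || PySem.Chars.isIn [c] "-_.".toList)) then false
        else true

-- ===== PORT B =====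
-- while e and path[e-1] == '/': e -= 1   (e stays in 0..len, so the index is always in range
-- and Nat subtraction is exact; the .getD default is never consulted on a reachable state)
def bTrim (p : List Char) : Nat → Nat
  | e =>
    if _h : 0 < e ∧ ((PySem.List.pyGet? p ((e : Int) - 1)).getD ' ' == '/') then bTrim p (e - 1)
    else e
termination_by e => e
decreasing_by omega

-- the for-loop over path[:e] with early returns: state 0 = owner, 1 = repo
def bScan : List Char → Nat → Bool → Bool → Bool
  | [], state, seen, ok => state == 1 && seen && ok
  | c :: rest, state, seen, ok =>
    if c == '/' then
      if state == 1 then seen && ok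
      else if !seen then false
      else bScan rest 1 false ok
    else if state == 1 then
      bScan rest 1 true (ok && (PySem.Chars.isalnum c || PySem.Chars.isIn [c] "-_.".toList))
    else bScan rest state true ok

def bCheck (path : List Char) : Bool :=
  let e0 := bTrim path path.length
  -- if e >= 4 and path[e-4:e] == '.git': e -= 4   (guard makes the Nat subtraction exact)
  let e := if 4 ≤ e0 && (PySem.Chars.slice path (some ((e0 : Int) - 4)) (some (e0 : Int)) == ".git".toList)
           then e0 - 4 else e0
  bScan (PySem.Chars.slice path none (some (e : Int))) 0 false true

def validate_repo_url_alt (url : String) : Bool :=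
  if url == "" then false
  else
    let u := (PySem.Str.strip url).toList
    if PySem.Chars.startswith u ['#'] then false
    else if PySem.Chars.startswith u "https://github.com/".toList then
      bCheck (PySem.Chars.slice u (some 19) none)
    else if PySem.Chars.startswith u "http://github.com/".toList then
      bCheck (PySem.Chars.slice u (some 18) none)
    else false

-- ===== PRECONDITION & SPEC =====
def Spec_validate_repo_url (url : String) (out : Bool) : Prop := out = validate_repo_url_alt url
instance (url : String) (out : Bool) : Decidable (Spec_validate_repo_url url out) := by unfold Spec_validate_repo_url; infer_instance

-- ===== CLAIM (what is proved, stated in full; the proofs are below) =====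
def Claim_equal_validate_repo_url : Prop := ∀ (url : String), Dom_validate_repo_url url → Spec_validate_repo_url url (validate_repo_url url)

-- ===== LEMMAS AND PROOFS =====

-- reference shape of path.split('/') (for the proofs only)
def splitSlashSpec (cs : List Char) : List (List Char) :=
  match h : cs.dropWhile (fun c => c != '/') with
  | [] => [cs]
  | _ :: t => cs.takeWhile (fun c => c != '/') :: splitSlashSpec t
termination_by cs.length
decreasing_by
  have hle := List.length_dropWhile_le (fun c => c != '/') cs
  rw [h] at hle
  simp at hle
  omega

lemma splitSlashSpec_ne_nil (cs : List Char) : splitSlashSpec cs ≠ [] := by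
  rw [splitSlashSpec]
  split <;> simp

lemma spec_drop_nil (cs : List Char) (h : cs.dropWhile (fun c => c != '/') = []) :
    splitSlashSpec cs = [cs] := by
  rw [splitSlashSpec]
  split
  · rfl
  · next head t heq => rw [h] at heq; cases heq

lemma spec_drop_cons (cs : List Char) (y : Char) (t : List Char)
    (h : cs.dropWhile (fun c => c != '/') = y :: t) :
    splitSlashSpec cs = cs.takeWhile (fun c => c != '/') :: splitSlashSpec t := by
  rw [splitSlashSpec]
  split
  · next heq => rw [h] at heq; cases heq
  · next head t' heq => rw [h] at heq; cases heq; rfl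

lemma goS_nil (sep cur : List Char) (acc : List (List Char)) (f : Nat) :
    PySem.Chars.splitOn.go sep f [] cur acc = (cur.reverse :: acc).reverse := by
  cases f <;> rw [PySem.Chars.splitOn.go] <;> simp

lemma goS_ne (sep cur : List Char) (acc : List (List Char)) (f : Nat) (c : Char) (rest : List Char)
    (h : sep.isPrefixOf (c :: rest) = false) :
    PySem.Chars.splitOn.go sep (f + 1) (c :: rest) cur acc
      = PySem.Chars.splitOn.go sep f rest (c :: cur) acc := by
  rw [PySem.Chars.splitOn.go]; simp [h]

lemma goS_hit (sep cur : List Char) (acc : List (List Char)) (f : Nat) (c : Char) (rest : List Char)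
    (h : sep.isPrefixOf (c :: rest) = true) :
    PySem.Chars.splitOn.go sep (f + 1) (c :: rest) cur acc
      = PySem.Chars.splitOn.go sep f (List.drop sep.length (c :: rest)) [] (cur.reverse :: acc) := by
  rw [PySem.Chars.splitOn.go]; simp [h]

def consFirst (x : List Char) : List (List Char) → List (List Char)
  | [] => [x]
  | y :: ys => (x ++ y) :: ys

lemma goS_spec (cs : List Char) : ∀ (fuel : Nat) (cur : List Char) (acc : List (List Char)),
    cs.length ≤ fuel →
    PySem.Chars.splitOn.go ['/'] fuel cs cur acc
      = acc.reverse ++ consFirst cur.reverse (splitSlashSpec cs) := by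
  induction cs with
  | nil =>
    intro fuel cur acc _
    rw [goS_nil, splitSlashSpec]
    simp [consFirst]
  | cons c rest ih =>
    intro fuel cur acc hf
    obtain ⟨f, rfl⟩ : ∃ f, fuel = f + 1 := ⟨fuel - 1, by simp at hf; omega⟩
    by_cases hc : c = '/'
    · subst hc
      rw [goS_hit _ _ _ _ _ _ (by simp [List.isPrefixOf])]
      simp only [List.length_cons, List.length_nil, List.drop_succ_cons, List.drop_zero]
      rw [ih f [] (cur.reverse :: acc) (by simp at hf ⊢; omega)]
      have hs : splitSlashSpec ('/'::rest) = [] :: splitSlashSpec rest := by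
        rw [spec_drop_cons ('/'::rest) '/' rest (by simp [List.dropWhile])]
        simp [List.takeWhile]
      rw [hs]
      rcases hsr : splitSlashSpec rest with _ | ⟨x, xs⟩
      · exact absurd hsr (splitSlashSpec_ne_nil rest)
      · simp [consFirst]
    · rw [goS_ne _ _ _ _ _ _ (by simp [List.isPrefixOf]; exact fun h => (hc h.symm).elim)]
      rw [ih f (c::cur) acc (by simp at hf ⊢; omega)]
      have hc' : (c != '/') = true := by simp [hc]
      rcases hd : rest.dropWhile (fun c => c != '/') with _ | ⟨y, t⟩
      · have h1 : splitSlashSpec (c::rest) = [c::rest] :=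
          spec_drop_nil (c::rest) (by simp [List.dropWhile, hc', hd])
        have h2 : splitSlashSpec rest = [rest] := spec_drop_nil rest hd
        rw [h1, h2]
        simp [consFirst]
      · have h1 : splitSlashSpec (c::rest)
            = (c::rest).takeWhile (fun c => c != '/') :: splitSlashSpec t :=
          spec_drop_cons (c::rest) y t (by simp [List.dropWhile, hc', hd])
        have h2 : splitSlashSpec rest = rest.takeWhile (fun c => c != '/') :: splitSlashSpec t :=
          spec_drop_cons rest y t hd
        rw [h1, h2]
        simp [consFirst, List.takeWhile, hc']

lemma splitOn_eq_spec (cs : List Char) :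
    PySem.Chars.splitOn cs ['/'] = splitSlashSpec cs := by
  unfold PySem.Chars.splitOn
  rw [goS_spec cs (cs.length + 1) [] [] (by omega)]
  rcases h : splitSlashSpec cs with _ | ⟨x, xs⟩
  · exact absurd h (splitSlashSpec_ne_nil cs)
  · simp [consFirst]

lemma goM_nil (sep cur : List Char) (acc : List (List Char)) (f m : Nat) :
    PySem.Chars.splitOnMax.go sep f m [] cur acc = (cur.reverse :: acc).reverse := by
  cases f <;> rw [PySem.Chars.splitOnMax.go] <;> simp

lemma goM_ne (sep cur : List Char) (acc : List (List Char)) (f : Nat) (c : Char) (rest : List Char)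
    (m : Nat) (hm : m ≠ 0) (h : sep.isPrefixOf (c :: rest) = false) :
    PySem.Chars.splitOnMax.go sep (f + 1) m (c :: rest) cur acc
      = PySem.Chars.splitOnMax.go sep f m rest (c :: cur) acc := by
  rw [PySem.Chars.splitOnMax.go]; simp [h, hm]

lemma goM_hit (sep cur : List Char) (acc : List (List Char)) (f : Nat) (c : Char) (rest : List Char)
    (m : Nat) (hm : m ≠ 0) (h : sep.isPrefixOf (c :: rest) = true) :
    PySem.Chars.splitOnMax.go sep (f + 1) m (c :: rest) cur acc
      = PySem.Chars.splitOnMax.go sep f (m - 1) (List.drop sep.length (c :: rest)) [] (cur.reverse :: acc) := by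
  rw [PySem.Chars.splitOnMax.go]; simp [h, hm]

lemma goM_fin (sep cur : List Char) (acc : List (List Char)) (f : Nat) (rest : List Char) :
    PySem.Chars.splitOnMax.go sep f 0 rest cur acc = ((cur.reverse ++ rest) :: acc).reverse := by
  rcases rest with _ | ⟨c, t⟩
  · rw [goM_nil]; simp
  · cases f <;> rw [PySem.Chars.splitOnMax.go] <;> simp

lemma goM_skip (pre : List Char) (hg : 'g' ∉ pre) :
    ∀ (cs cur : List Char) (acc : List (List Char)) (f : Nat),
    PySem.Chars.splitOnMax.go "github.com/".toList (pre.length + f) 1 (pre ++ cs) cur acc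
      = PySem.Chars.splitOnMax.go "github.com/".toList f 1 cs (pre.reverse ++ cur) acc := by
  induction pre with
  | nil => intro cs cur acc f; simp
  | cons c p ih =>
    intro cs cur acc f
    simp only [List.mem_cons, not_or] at hg
    have hne : ("github.com/".toList).isPrefixOf (c :: (p ++ cs)) = false := by
      rw [← Bool.not_eq_true, List.isPrefixOf_iff_prefix,
          show ("github.com/".toList) = 'g'::"ithub.com/".toList from rfl,
          List.cons_prefix_cons]
      rintro ⟨h1, -⟩
      exact hg.1 h1
    have hfe : (c :: p).length + f = (p.length + f) + 1 := by simp; omega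
    rw [hfe, List.cons_append, goM_ne _ _ _ _ _ _ _ (by omega) hne,
        ih hg.2 cs (c :: cur) acc f]
    simp

lemma splitMax_pre (pre rest : List Char) (hg : 'g' ∉ pre) :
    PySem.Chars.splitOnMax (pre ++ ("github.com/".toList ++ rest)) "github.com/".toList 1
      = [pre, rest] := by
  unfold PySem.Chars.splitOnMax
  rw [if_neg (by omega)]
  have hlen : (pre ++ ("github.com/".toList ++ rest)).length + 1
      = pre.length + (rest.length + 12) := by simp; omega
  rw [show ((1:Int).toNat) = 1 from rfl, hlen, goM_skip pre hg _ _ _ _]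
  have h12 : rest.length + 12 = (rest.length + 11) + 1 := by omega
  rw [h12]
  rw [show ("github.com/".toList ++ rest) = 'g' :: ("ithub.com/".toList ++ rest) from rfl]
  rw [goM_hit _ _ _ _ _ _ _ (by omega)
      (by rw [List.isPrefixOf_iff_prefix]
          exact List.prefix_append "github.com/".toList rest)]
  rw [show List.drop ("github.com/".toList).length ('g' :: ("ithub.com/".toList ++ rest)) = rest from rfl]
  rw [goM_fin]
  simp

-- ---- B-side lemmas: the trimming index ----

lemma bTrim_le (p : List Char) (e : Nat) : bTrim p e ≤ e := by
  induction e using Nat.strong_induction_on with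
  | _ e ih =>
    rw [bTrim]
    split
    · next h => exact le_trans (ih (e-1) (by omega)) (by omega)
    · exact le_rfl

lemma bTrim_append (ys : List Char) (c : Char) :
    ∀ e, e ≤ ys.length → bTrim (ys ++ [c]) e = bTrim ys e := by
  intro e
  induction e using Nat.strong_induction_on with
  | _ e ih =>
    intro he
    by_cases h0 : e = 0
    · subst h0
      conv_lhs => rw [bTrim]
      conv_rhs => rw [bTrim]
      simp
    · have h1 : ((e : Int) - 1) = ((e - 1 : Nat) : Int) := by omega
      have hget : (PySem.List.pyGet? (ys ++ [c]) ((e : Int) - 1))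
          = (PySem.List.pyGet? ys ((e : Int) - 1)) := by
        rw [h1, PySem.List.pyGet?_natCast, PySem.List.pyGet?_natCast,
            List.getElem?_append_left (by omega)]
      conv_lhs => rw [bTrim]
      conv_rhs => rw [bTrim]
      rw [hget]
      split
      · exact ih (e-1) (by omega) (by omega)
      · rfl

lemma bTrim_take (p : List Char) :
    p.take (bTrim p p.length) = (p.reverse.dropWhile (fun c => c == '/')).reverse := by
  induction p using List.reverseRecOn with
  | nil => simp [bTrim]
  | append_singleton ys c ih =>
    have hlen : (ys ++ [c]).length = ys.length + 1 := by simp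
    rw [hlen, bTrim]
    have hget : (PySem.List.pyGet? (ys ++ [c]) ((↑(ys.length + 1) : Int) - 1)).getD ' ' = c := by
      have h1 : ((↑(ys.length + 1) : Int) - 1) = ((ys.length : Nat) : Int) := by omega
      rw [h1, PySem.List.pyGet?_natCast]
      simp
    by_cases hc : c = '/'
    · subst hc
      rw [dif_pos ⟨by omega, by rw [hget]; decide⟩]
      have h2 : ys.length + 1 - 1 = ys.length := by omega
      rw [h2, bTrim_append ys '/' ys.length le_rfl]
      rw [List.take_append_of_le_length (bTrim_le ys ys.length)]
      rw [ih]
      simp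
    · rw [dif_neg (by
        rintro ⟨-, h⟩
        rw [hget] at h
        exact hc (by simpa using h))]
      rw [List.take_of_length_le (by simp)]
      have hcb : (c == '/') = false := by simp [hc]
      simp [hcb]

-- ---- B-side lemmas: the scan ----

lemma scanRepo (cs : List Char) : ∀ (seen ok : Bool),
    bScan cs 1 seen ok
      = ((seen || !(cs.takeWhile (fun c => c != '/')).isEmpty)
          && (ok && (cs.takeWhile (fun c => c != '/')).all
                (fun c => PySem.Chars.isalnum c || PySem.Chars.isIn [c] "-_.".toList))) := by
  induction cs with
  | nil => intro seen ok; simp [bScan]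
  | cons c rest ih =>
    intro seen ok
    by_cases hc : c = '/'
    · subst hc
      rw [bScan]
      simp [List.takeWhile]
    · have hc' : (c != '/') = true := by simp [hc]
      rw [bScan]
      rw [if_neg (by simp [hc]), if_pos (show ((1 : Nat) == 1) = true by decide), ih]
      simp only [List.takeWhile, hc', List.all_cons, List.isEmpty_cons, Bool.true_or]
      cases ok <;> cases seen <;> simp [Bool.and_comm]

lemma scanOwner (cs : List Char) : ∀ (seen : Bool),
    bScan cs 0 seen true
      = (match cs.dropWhile (fun c => c != '/') with
         | [] => false
         | _ :: t => (seen || !(cs.takeWhile (fun c => c != '/')).isEmpty)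
                      && bScan t 1 false true) := by
  induction cs with
  | nil => intro seen; simp [bScan, List.dropWhile]
  | cons c rest ih =>
    intro seen
    by_cases hc : c = '/'
    · subst hc
      rw [bScan]
      simp only [List.dropWhile, List.takeWhile]
      cases seen <;> simp
    · have hc' : (c != '/') = true := by simp [hc]
      rw [bScan]
      rw [if_neg (by simp [hc]), if_neg (by simp), ih true]
      simp only [List.dropWhile, List.takeWhile, hc']
      rcases hd : rest.dropWhile (fun c => c != '/') with _ | ⟨y, t⟩
      · rfl
      · simp

-- A's core if-chain on parts = splitSlashSpec path, compared with B's single scan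
lemma core_eq (path : List Char) :
    (if (PySem.Chars.splitOn path ['/']).length < 2 then false
     else
       if ((PySem.Chars.splitOn path ['/']).getD 0 []).isEmpty
          || ((PySem.Chars.splitOn path ['/']).getD 1 []).isEmpty then false
       else if !(((PySem.Chars.splitOn path ['/']).getD 1 []).all
                   (fun c => PySem.Chars.isalnum c || PySem.Chars.isIn [c] "-_.".toList)) then false
       else true)
    = bScan path 0 false true := by
  rw [splitOn_eq_spec, scanOwner path false]
  rcases hd : path.dropWhile (fun c => c != '/') with _ | ⟨y, t⟩
  · rw [spec_drop_nil path hd]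
    simp
  · rw [spec_drop_cons path y t hd]
    have hred : (match y :: t with
        | [] => false
        | _ :: t => (false || !(path.takeWhile (fun c => c != '/')).isEmpty)
                     && bScan t 1 false true)
        = ((false || !(path.takeWhile (fun c => c != '/')).isEmpty) && bScan t 1 false true) := rfl
    rw [hred, scanRepo t false true]
    have hhead : (splitSlashSpec t).getD 0 [] = t.takeWhile (fun c => c != '/') := by
      rcases hd2 : t.dropWhile (fun c => c != '/') with _ | ⟨z, t2⟩
      · rw [spec_drop_nil t hd2]
        have : t.takeWhile (fun c => c != '/') = t :=
          List.takeWhile_eq_self_iff.mpr (by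
            intro x hx
            exact List.dropWhile_eq_nil_iff.mp hd2 x hx)
        simp [this]
      · rw [spec_drop_cons t z t2 hd2]; rfl
    have hlen : ¬ ((t.takeWhile (fun c => c != '/')) :: splitSlashSpec t).length < 2 := by
      have := splitSlashSpec_ne_nil t
      rcases h : splitSlashSpec t with _ | ⟨x, xs⟩
      · exact absurd h this
      · simp
    rw [show ((path.takeWhile (fun c => c != '/')) :: splitSlashSpec t).getD 0 []
          = path.takeWhile (fun c => c != '/') from rfl]
    rw [show ((path.takeWhile (fun c => c != '/')) :: splitSlashSpec t).getD 1 []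
          = (splitSlashSpec t).getD 0 [] from rfl, hhead]
    rw [if_neg (by
      have := splitSlashSpec_ne_nil t
      rcases h : splitSlashSpec t with _ | ⟨x, xs⟩
      · exact absurd h this
      · simp)]
    cases ho : (path.takeWhile (fun c => c != '/')).isEmpty <;>
      cases hr : (t.takeWhile (fun c => c != '/')).isEmpty <;>
        cases ha : (t.takeWhile (fun c => c != '/')).all
            (fun c => PySem.Chars.isalnum c || PySem.Chars.isIn [c] "-_.".toList) <;>
          simp [Bool.and_assoc]  -- closes each Boolean case

-- ---- the tail equality: A's per-path pipeline = bCheck ----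
lemma tail_eq (p : List Char) :
    (let path1 := (p.reverse.dropWhile (fun c => c == '/')).reverse
     let path := if PySem.Chars.endswith path1 ".git".toList
                 then PySem.Chars.slice path1 none (some (-4)) else path1
     let parts := PySem.Chars.splitOn path ['/']
     if parts.length < 2 then false
     else
       let owner := parts.getD 0 []
       let repo := parts.getD 1 []
       if owner.isEmpty || repo.isEmpty then false
       else if !(repo.all (fun c => PySem.Chars.isalnum c || PySem.Chars.isIn [c] "-_.".toList)) then false
       else true)
    = bCheck p := by
  unfold bCheck
  simp only []
  set e0 := bTrim p p.length with he0
  have hle : e0 ≤ p.length := bTrim_le p p.length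
  have hpath1 : (p.reverse.dropWhile (fun c => c == '/')).reverse = p.take e0 :=
    (bTrim_take p).symm
  have hlen1 : (p.take e0).length = e0 := by simp [hle]
  -- the .git guard on both sides agrees
  have hguard : PySem.Chars.endswith (p.take e0) ".git".toList
      = (4 ≤ e0 && (PySem.Chars.slice p (some ((e0 : Int) - 4)) (some (e0 : Int)) == ".git".toList)) := by
    by_cases h4 : 4 ≤ e0
    · have hcast : ((e0 : Int) - 4) = ((e0 - 4 : Nat) : Int) := by omega
      have hslice : PySem.Chars.slice p (some ((e0 : Int) - 4)) (some (e0 : Int))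
          = (p.drop (e0 - 4)).take (e0 - (e0 - 4)) := by
        rw [hcast]
        simp only [PySem.Chars.slice_eq_listSlice]
        exact PySem.List.slice_natCast p (e0 - 4) e0
      have hdt : (p.take e0).drop (e0 - 4) = (p.drop (e0-4)).take (e0 - (e0 - 4)) :=
        List.drop_take ..
      rw [hslice, ← hdt]
      simp only [h4, decide_true, Bool.true_and]
      rcases hew : PySem.Chars.endswith (p.take e0) ".git".toList with _ | _
      · -- endswith false: the 4-char tail differs
        symm
        rw [beq_eq_false_iff_ne]
        intro habs
        rw [← Bool.not_eq_true, PySem.Chars.endswith_iff] at hew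
        exact hew ⟨(p.take e0).take (e0 - 4), by
          rw [← habs]
          rw [List.take_append_drop]⟩
      · symm
        rw [beq_iff_eq]
        rw [PySem.Chars.endswith_iff] at hew
        obtain ⟨t, ht⟩ := hew
        have hlt : t.length = e0 - 4 := by
          have := congrArg List.length ht
          simp at this
          omega
        rw [← ht, ← hlt, List.drop_left]
    · -- e0 < 4: both sides false
      have h1 : PySem.Chars.endswith (p.take e0) ".git".toList = false := by
        rw [← Bool.not_eq_true, PySem.Chars.endswith_iff]
        rintro ⟨t, ht⟩
        have := congrArg List.length ht
        simp [hlen1] at this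
        omega
      rw [h1]
      simp [h4]
  rw [hpath1, hguard]
  by_cases hg : (4 ≤ e0 && (PySem.Chars.slice p (some ((e0 : Int) - 4)) (some (e0 : Int)) == ".git".toList)) = true
  · rw [hg, if_pos rfl, if_pos rfl]
    have h4 : 4 ≤ e0 := by
      rcases Bool.and_eq_true .. |>.mp hg with ⟨h, -⟩
      exact of_decide_eq_true h
    have hsl : PySem.Chars.slice (p.take e0) none (some (-4)) = p.take (e0 - 4) := by
      simp only [PySem.Chars.slice_eq_listSlice]
      rw [show ((-4 : Int)) = -((4 : Nat) : Int) from by norm_num]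
      rw [PySem.List.slice_to_neg_natCast _ _ (by omega)]
      rw [hlen1, List.take_take]
      congr 1
      omega
    rw [hsl]
    have hB : PySem.Chars.slice p none (some ((e0 - 4 : Nat) : Int)) = p.take (e0 - 4) := by
      simp only [PySem.Chars.slice_eq_listSlice]
      exact PySem.List.slice_to_natCast ..
    rw [hB]
    exact core_eq (p.take (e0 - 4))
  · rw [Bool.not_eq_true] at hg
    rw [hg]
    simp only [Bool.false_eq_true, if_false]
    have hB : PySem.Chars.slice p none (some ((e0 : Nat) : Int)) = p.take e0 := by
      simp only [PySem.Chars.slice_eq_listSlice]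
      exact PySem.List.slice_to_natCast ..
    rw [hB]
    exact core_eq (p.take e0)

-- ===== VERDICT (by name: the statement is the Claim_ definition above) =====
theorem validate_repo_url_spec : Claim_equal_validate_repo_url := by
  intro url _
  unfold Spec_validate_repo_url validate_repo_url validate_repo_url_alt
  simp only [PySem.Str.toList_strip]
  by_cases h0 : (url == "") = true
  · simp [h0]
  · rw [if_neg h0, if_neg h0]
    by_cases h1 : PySem.Chars.startswith (PySem.Chars.strip url.toList) ['#'] = true
    · rw [if_pos h1, if_pos h1]
    · rw [if_neg h1, if_neg h1]
      by_cases h2 : PySem.Chars.startswith (PySem.Chars.strip url.toList) "https://github.com/".toList = true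
      · obtain ⟨rest, hrest⟩ : ∃ rest,
            PySem.Chars.strip url.toList = "https://github.com/".toList ++ rest := by
          obtain ⟨t, ht⟩ := (PySem.Chars.startswith_iff _ _).1 h2
          exact ⟨t, ht.symm⟩
        rw [if_neg (show ¬((!PySem.Chars.startswith (PySem.Chars.strip url.toList) "https://github.com/".toList
              && !PySem.Chars.startswith (PySem.Chars.strip url.toList) "http://github.com/".toList) = true)
              from by rw [h2]; simp),
            if_pos h2]
        rw [hrest,
            show ("https://github.com/".toList) = "https://".toList ++ "github.com/".toList from rfl,
            List.append_assoc,
            splitMax_pre "https://".toList rest (by decide)]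
        rw [show (PySem.List.pyGet? ["https://".toList, rest] (-1)).getD [] = rest from rfl]
        rw [show PySem.Chars.slice ("https://".toList ++ ("github.com/".toList ++ rest)) (some 19) none
              = rest from by
          simp only [PySem.Chars.slice_eq_listSlice]
          rw [PySem.List.slice_from _ (by omega), ← List.append_assoc]
          exact List.drop_left' (by rfl)]
        exact tail_eq rest
      · by_cases h3 : PySem.Chars.startswith (PySem.Chars.strip url.toList) "http://github.com/".toList = true
        · obtain ⟨rest, hrest⟩ : ∃ rest,
              PySem.Chars.strip url.toList = "http://github.com/".toList ++ rest := by
            obtain ⟨t, ht⟩ := (PySem.Chars.startswith_iff _ _).1 h3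
            exact ⟨t, ht.symm⟩
          rw [if_neg (show ¬((!PySem.Chars.startswith (PySem.Chars.strip url.toList) "https://github.com/".toList
                && !PySem.Chars.startswith (PySem.Chars.strip url.toList) "http://github.com/".toList) = true)
                from by rw [h3]; simp),
              if_neg h2, if_pos h3]
          rw [hrest,
              show ("http://github.com/".toList) = "http://".toList ++ "github.com/".toList from rfl,
              List.append_assoc,
              splitMax_pre "http://".toList rest (by decide)]
          rw [show (PySem.List.pyGet? ["http://".toList, rest] (-1)).getD [] = rest from rfl]
          rw [show PySem.Chars.slice ("http://".toList ++ ("github.com/".toList ++ rest)) (some 18) none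
                = rest from by
            simp only [PySem.Chars.slice_eq_listSlice]
            rw [PySem.List.slice_from _ (by omega), ← List.append_assoc]
            exact List.drop_left' (by rfl)]
          exact tail_eq rest
        · simp only [Bool.not_eq_true] at h2 h3
          rw [h2, h3]
          simp
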